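-- pv_equiv track=rewrite | github.com/GaserDaser1/LaboratoryWork | SD Laba1.py | find_min_n
-- ===== SOURCE A (Python) =====
-- import math
--
-- def find_min_n(A, B):
--     # Разложение A на простые множители
--     def factorize(x):
--         factors = {}
--         while x % 2 == 0:
--             factors[2] = factors.get(2, 0) + 1
--             x = x // 2
--         i = 3
--         max_factor = math.sqrt(x) + 1
--         while i <= max_factor:
--             while x % i == 0:
--                 factors[i] = factors.get(i, 0) + 1
--                 x = x // i
--                 max_factor = math.sqrt(x) + 1
--             i += 2
--         if x > 1:
--             factors[x] = factors.get(x, 0) + 1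
--         return factors
--
--     factors_A = factorize(A)
--     factors_B = factorize(B)
--
--     # Проверка всех ростых множителей A есть в B
--     for p in factors_A:
--         if p not in factors_B:
--             return -1
--
--
--     # Вычисление минимального n
--     n = 0
--     for p in factors_A:
--         required = (factors_A[p] + factors_B[p] - 1) // factors_B[p]
--         if required > n:
--             n = required
--
--     return n
-- ===== SOURCE B (Python) =====
-- def find_min_n(A, B):
--     # minimal n with A | B^n via the order of B modulo the divisibility chain:
--     # cur = B^n % A; any feasible answer is < A.bit_length(), so stop there.
--     cap = A.bit_length()
--     cur = 1 % A
--     n = 0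
--     while n < cap:
--         if cur == 0:
--             return n
--         cur = cur * B % A
--         n += 1
--     return -1
-- ===== Notes on version B (the rewrite author's own statement) =====
-- stated objective: alternative
-- what changed: B drops trial-division factorization entirely and instead searches for the least n with B^n % A == 0 by maintaining cur = B^n mod A, capped at A.bit_length() (any feasible answer is smaller), returning -1 if the cap is reached.
-- outside the precondition, e.g. on find_min_n(0, 5): A does not finish within the time limit, B raises ZeroDivisionError; on find_min_n(-4, 2): A raises ValueError, B returns 2; on find_min_n(6, 0): A does not finish within the time limit, B returns 1
import Mathlib
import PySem

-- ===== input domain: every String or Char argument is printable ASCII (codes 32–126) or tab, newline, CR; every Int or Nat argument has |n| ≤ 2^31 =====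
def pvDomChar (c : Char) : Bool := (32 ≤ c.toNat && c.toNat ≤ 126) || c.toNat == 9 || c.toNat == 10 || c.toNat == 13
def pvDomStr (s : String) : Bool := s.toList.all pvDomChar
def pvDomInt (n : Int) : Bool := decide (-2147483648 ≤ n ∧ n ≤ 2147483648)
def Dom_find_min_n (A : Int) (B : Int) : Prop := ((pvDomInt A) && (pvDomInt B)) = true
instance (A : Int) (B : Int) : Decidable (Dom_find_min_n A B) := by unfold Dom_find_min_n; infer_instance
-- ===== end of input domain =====

-- B replaces A's trial-division factorization by a modular-power search (alternative algorithm);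
-- return-value equivalence is proved on A ≥ 1, B ≥ 1 (elsewhere A raises or never terminates).

-- ===== PORT A =====
-- inner loop `while x % i == 0: factors[i] = factors.get(i, 0) + 1; x = x // i`
-- (the guards 0 < x, 2 ≤ i only totalize: Python never terminates from x = 0, and i is 2 or odd ≥ 3)
def stripFac (i : Nat) (x : Nat) (d : PySem.Dict Int Int) : PySem.Dict Int Int × Nat :=
  if h : 2 ≤ i ∧ 0 < x ∧ x % i = 0 then
    stripFac i (x / i) (d.insert (i : Int) (d.getD (i : Int) 0 + 1))
  else (d, x)
termination_by x
decreasing_by exact Nat.div_lt_self h.2.1 (by omega)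

theorem stripFac_snd_le (i x : Nat) (d : PySem.Dict Int Int) : (stripFac i x d).2 ≤ x := by
  induction x using Nat.strong_induction_on generalizing d with
  | _ x ih =>
    rw [stripFac]
    split
    next h => exact le_trans (ih _ (Nat.div_lt_self h.2.1 (by omega)) _) (Nat.div_le_self _ _)
    next => exact le_rfl

-- outer loop `while i <= max_factor: … ; i += 2`; Python's float condition `i <= math.sqrt(x) + 1`
-- is exactly `(i-1)^2 ≤ x` on this domain (x ≤ 2^31, correctly rounded double sqrt; checked against CPython)
def oddLoop (i : Nat) (x : Nat) (d : PySem.Dict Int Int) : PySem.Dict Int Int × Nat :=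
  if h : (i - 1) * (i - 1) ≤ x ∧ 3 ≤ i ∧ 0 < x then
    let p := stripFac i x d
    oddLoop (i + 2) p.2 p.1
  else (d, x)
termination_by (x, x + 2 - i)
decreasing_by
  have hle := stripFac_snd_le i x d
  rcases Nat.lt_or_ge (stripFac i x d).2 x with hlt | hge
  · exact Prod.Lex.left _ _ hlt
  · have hx : (stripFac i x d).2 = x := le_antisymm hle hge
    rw [hx]
    refine Prod.Lex.right _ ?_
    have h3 : i - 1 ≤ x := le_trans (Nat.le_mul_of_pos_left _ (by omega)) h.1
    omega

def factorize (x0 : Int) : PySem.Dict Int Int :=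
  -- x0.toNat is faithful on the claimed inputs (factorize is only reached with x0 ≥ 1)
  let p1 := stripFac 2 x0.toNat PySem.Dict.empty
  let p2 := oddLoop 3 p1.2 p1.1
  if 1 < p2.2 then p2.1.insert (p2.2 : Int) (p2.1.getD (p2.2 : Int) 0 + 1) else p2.1

def find_min_n (A : Int) (B : Int) : Int :=
  let fA := factorize A
  let fB := factorize B
  -- `for p in factors_A: if p not in factors_B: return -1`
  if fA.keys.any (fun p => !(fB.contains p)) then -1
  else
    -- `for p in factors_A: required = (factors_A[p] + factors_B[p] - 1) // factors_B[p]; if required > n: n = required`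
    fA.items.foldl (fun n pa =>
      let required := PySem.Int.floordiv (pa.2 + fB.getD pa.1 0 - 1) (fB.getD pa.1 0)
      if n < required then required else n) 0

-- ===== PORT B =====
def altLoop (A : Int) (B : Int) (cur : Int) (n : Nat) (cap : Nat) : Int :=
  if n < cap then
    if cur = 0 then (n : Int)
    else altLoop A B (PySem.Int.mod (cur * B) A) (n + 1) cap
  else -1
termination_by cap - n

def find_min_n_alt (A : Int) (B : Int) : Int :=
  altLoop A B (PySem.Int.mod 1 A) 0 (PySem.Int.bitLength A)

-- ===== PRECONDITION & SPEC =====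
-- Pre_: A will not return otherwise: factorize never terminates on 0 and math.sqrt raises on negatives,
-- and 1 % A raises ZeroDivisionError in B for A = 0.
def Pre_find_min_n (A : Int) (B : Int) : Prop := 1 ≤ A ∧ 1 ≤ B
instance (A : Int) (B : Int) : Decidable (Pre_find_min_n A B) := by unfold Pre_find_min_n; infer_instance
def pvWitness_find_min_n : Int × Int := (12, 6)

def Spec_find_min_n (A : Int) (B : Int) (out : Int) : Prop := out = find_min_n_alt A B
instance (A : Int) (B : Int) (out : Int) : Decidable (Spec_find_min_n A B out) := by unfold Spec_find_min_n; infer_instance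

-- ===== CLAIM (what is proved, stated in full; the proofs are below) =====
def Claim_equal_find_min_n : Prop := ∀ (A : Int) (B : Int), Dom_find_min_n A B → Pre_find_min_n A B → Spec_find_min_n A B (find_min_n A B)

-- ===== LEMMAS AND PROOFS =====

-- full semantics of the inner strip loop
theorem stripFac_spec (i x : Nat) (d : PySem.Dict Int Int) (hi : 2 ≤ i) (hx : 0 < x) :
    ∃ k : Nat, (stripFac i x d).2 * i ^ k = x ∧ ¬ i ∣ (stripFac i x d).2 ∧
      ((k = 0 ∧ (stripFac i x d).1 = d) ∨
       (0 < k ∧ (stripFac i x d).1 = d.insert (i : Int) (d.getD (i : Int) 0 + (k : Int)))) := by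
  induction x using Nat.strong_induction_on generalizing d with
  | _ x ih =>
    rw [stripFac]
    split
    next h =>
      have hdvd : i ∣ x := Nat.dvd_of_mod_eq_zero h.2.2
      have hlt : x / i < x := Nat.div_lt_self hx (by omega)
      have hxi : 0 < x / i := Nat.div_pos (Nat.le_of_dvd hx hdvd) (by omega)
      obtain ⟨k, hk1, hk2, hk3⟩ := ih (x / i) hlt (d.insert (i : Int) (d.getD (i : Int) 0 + 1)) hxi
      refine ⟨k + 1, ?_, hk2, Or.inr ⟨by omega, ?_⟩⟩
      · rw [pow_succ, ← mul_assoc, hk1, Nat.div_mul_cancel hdvd]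
      · rcases hk3 with ⟨h0, hd⟩ | ⟨hpos, hd⟩
        · subst h0
          rw [hd]; push_cast; ring_nf
        · rw [hd, PySem.Dict.getD_insert_self, PySem.Dict.insert_insert_self]
          push_cast; ring_nf
    next h =>
      have hnd : ¬ i ∣ x := fun hdvd => h ⟨hi, hx, Nat.mod_eq_zero_of_dvd hdvd⟩
      exact ⟨0, by simp, hnd, Or.inl ⟨rfl, rfl⟩⟩

-- dict content invariant: keys are exactly the (Int casts of) primes of x0 already fully stripped
-- out of the remaining cofactor x, each mapped to its full multiplicity in x0
def DictIs (x0 x : Nat) (d : PySem.Dict Int Int) : Prop :=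
  (∀ p : Nat, p.Prime → p ∣ x0 → ¬ p ∣ x → d.get? (p : Int) = some ((x0.factorization p : Int))) ∧
  (∀ q : Int, (∀ p : Nat, (p : Int) = q → ¬(p.Prime ∧ p ∣ x0 ∧ ¬ p ∣ x)) → d.get? q = none)

def FacInv (x0 x : Nat) (d : PySem.Dict Int Int) : Prop :=
  0 < x ∧ x ∣ x0 ∧ (∀ p : Nat, p.Prime → p ∣ x → x0.factorization p = x.factorization p) ∧
  DictIs x0 x d ∧ d.keys.Nodup

theorem stripFac_inv (x0 i x : Nat) (d : PySem.Dict Int Int) (hi : 2 ≤ i)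
    (hinv : FacInv x0 x d) (hsm : ∀ m, 2 ≤ m → m < i → ¬ m ∣ x) :
    FacInv x0 (stripFac i x d).2 (stripFac i x d).1 ∧
    (∀ m, 2 ≤ m → m < i + 1 → ¬ m ∣ (stripFac i x d).2) := by
  obtain ⟨hx, hxd, hmult, ⟨hd1, hd2⟩, hnd⟩ := hinv
  obtain ⟨k, hk1, hk2, hk3⟩ := stripFac_spec i x d hi hx
  set x' := (stripFac i x d).2 with hx'def
  have hx'pos : 0 < x' := by
    rcases Nat.eq_zero_or_pos x' with h0 | h; · rw [h0] at hk1; omega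
    · exact h
  have hx'dvdx : x' ∣ x := ⟨i ^ k, hk1.symm⟩
  have hsmall : ∀ m, 2 ≤ m → m < i + 1 → ¬ m ∣ x' := by
    intro m h2 hlt hdvd
    rcases Nat.lt_or_ge m i with hmi | hmi
    · exact hsm m h2 hmi (hdvd.trans hx'dvdx)
    · have hmi' : m = i := by omega
      exact hk2 (hmi' ▸ hdvd)
  rcases hk3 with ⟨h0, hdeq⟩ | ⟨hkpos, hdeq⟩
  · subst h0
    simp only [pow_zero, mul_one] at hk1
    refine ⟨?_, hsmall⟩
    rw [hdeq, hk1]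
    exact ⟨hx, hxd, hmult, ⟨hd1, hd2⟩, hnd⟩
  · have hidvdx : i ∣ x := ((dvd_pow_self i (by omega : k ≠ 0)).trans ⟨x', by rw [← hk1]; ring⟩)
    have hiprime : i.Prime := by
      have h2 : i.minFac ∣ x := (Nat.minFac_dvd i).trans hidvdx
      have hpf := Nat.minFac_prime (by omega : i ≠ 1)
      have hge : ¬ i.minFac < i := fun hlt => hsm i.minFac hpf.two_le hlt h2
      have heq : i.minFac = i := le_antisymm (Nat.minFac_le (by omega)) (by omega)
      exact heq ▸ hpf
    have hxne : x' ≠ 0 := by omega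
    have hikne : i ^ k ≠ 0 := pow_ne_zero _ (by omega)
    have hfx : ∀ p, x.factorization p = x'.factorization p + k * i.factorization p := by
      intro p
      rw [← hk1, Nat.factorization_mul hxne hikne, Nat.factorization_pow]
      simp
    have hfacti : ∀ p, i.factorization p = if i = p then 1 else 0 := by
      intro p
      rw [hiprime.factorization]
      exact Finsupp.single_apply
    have hfx'i : x'.factorization i = 0 := Nat.factorization_eq_zero_of_not_dvd hk2
    have hxfi : x.factorization i = k := by rw [hfx i, hfx'i, hfacti]; simp
    have hx0fi : x0.factorization i = k := by rw [hmult i hiprime hidvdx, hxfi]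
    have hmult' : ∀ p, p.Prime → p ∣ x' → x0.factorization p = x'.factorization p := by
      intro p hp hpd
      have hpx : p ∣ x := hpd.trans hx'dvdx
      have hpi : p ≠ i := fun he => hk2 (he ▸ hpd)
      rw [hmult p hp hpx, hfx p, hfacti p, if_neg (fun he => hpi he.symm)]
      simp
    have hgetnone : d.get? (i : Int) = none := by
      apply hd2
      intro p hpq hcon
      have hpi : p = i := by exact_mod_cast hpq
      exact hcon.2.2 (hpi ▸ hidvdx)
    have hgetD0 : d.getD (i : Int) 0 = 0 := PySem.Dict.getD_of_get?_eq_none _ _ hgetnone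
    have hdeq' : (stripFac i x d).1 = d.insert (i : Int) ((k : Int)) := by
      rw [hdeq, hgetD0, zero_add]
    have hc1 : ∀ p : Nat, p.Prime → p ∣ x0 → ¬ p ∣ x' →
        (stripFac i x d).1.get? (p : Int) = some ((x0.factorization p : Int)) := by
      intro p hp hpx0 hnp
      by_cases hpi : p = i
      · subst hpi
        rw [hdeq', PySem.Dict.get?_insert_self, hx0fi]
      · have hqi : (p : Int) ≠ (i : Int) := by exact_mod_cast hpi
        rw [hdeq', PySem.Dict.get?_insert_of_ne _ _ hqi]
        apply hd1 p hp hpx0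
        intro hpx
        rcases (Nat.Prime.dvd_mul hp).mp (by rw [hk1]; exact hpx) with hc | hc
        · exact hnp hc
        · exact hpi (hp.dvd_of_dvd_pow hc |> fun h => (Nat.prime_dvd_prime_iff_eq hp hiprime).mp h)
    have hc2 : ∀ q : Int, (∀ p : Nat, (p : Int) = q → ¬(p.Prime ∧ p ∣ x0 ∧ ¬ p ∣ x')) →
        (stripFac i x d).1.get? q = none := by
      intro q hq
      by_cases hqi : q = (i : Int)
      · exfalso
        exact hq i hqi.symm ⟨hiprime, hidvdx.trans hxd, hk2⟩
      · rw [hdeq', PySem.Dict.get?_insert_of_ne _ _ hqi]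
        apply hd2
        intro p hpq hcon
        exact hq p hpq ⟨hcon.1, hcon.2.1, fun hpx' => hcon.2.2 (hpx'.trans hx'dvdx)⟩
    refine ⟨⟨hx'pos, hx'dvdx.trans hxd, hmult', ⟨hc1, hc2⟩, ?_⟩, hsmall⟩
    rw [hdeq']
    exact PySem.Dict.nodup_keys_insert _ _ _ hnd

theorem oddLoop_inv (x0 i x : Nat) (d : PySem.Dict Int Int) (hi : 3 ≤ i) (hio : i % 2 = 1)
    (hinv : FacInv x0 x d) (hsm : ∀ m, 2 ≤ m → m < i → ¬ m ∣ x) :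
    FacInv x0 (oddLoop i x d).2 (oddLoop i x d).1 ∧
    ((oddLoop i x d).2 = 1 ∨ ((oddLoop i x d).2).Prime) := by
  revert hi hio hinv hsm
  induction i, x, d using oddLoop.induct with
  | case1 i x d h p ih =>
    intro hi hio hinv hsm
    rw [oddLoop, dif_pos h]
    simp only []
    obtain ⟨hinv', hsm'⟩ := stripFac_inv x0 i x d (by omega) hinv hsm
    have hsm'' : ∀ m, 2 ≤ m → m < i + 2 → ¬ m ∣ (stripFac i x d).2 := by
      intro m h2 hlt hdvd
      rcases Nat.lt_or_ge m (i + 1) with hc | hc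
      · exact hsm' m h2 hc hdvd
      · have hm : m = i + 1 := by omega
        have h2d : (2 : Nat) ∣ m := by omega
        exact hsm' 2 (le_refl 2) (by omega) (h2d.trans hdvd)
    exact ih (by omega) (by omega) hinv' hsm''
  | case2 i x d h =>
    intro hi hio hinv hsm
    rw [oddLoop, dif_neg h]
    refine ⟨hinv, ?_⟩
    rcases Nat.lt_or_ge x 2 with hx2 | hx2
    · left; have := hinv.1; omega
    · right
      by_contra hnp
      have hsq := Nat.minFac_sq_le_self (by omega) hnp
      have hsq' : x.minFac * x.minFac ≤ x := by nlinarith [hsq]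
      have hpf := Nat.minFac_prime (by omega : x ≠ 1)
      have hge : i ≤ x.minFac := by
        by_contra hlt
        exact hsm x.minFac hpf.two_le (by omega) (Nat.minFac_dvd x)
      have h1 : x < (i - 1) * (i - 1) := by
        have hguard : ¬ (i - 1) * (i - 1) ≤ x := fun hle => h ⟨hle, hi, hinv.1⟩
        omega
      have h2 : i - 1 < x.minFac := by omega
      nlinarith [h1, h2, hsq']

def FacSpec (x0 : Nat) (d : PySem.Dict Int Int) : Prop :=
  (∀ p : Nat, p.Prime → p ∣ x0 → d.get? (p : Int) = some ((x0.factorization p : Int))) ∧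
  (∀ q : Int, (∀ p : Nat, (p : Int) = q → ¬(p.Prime ∧ p ∣ x0)) → d.get? q = none) ∧
  d.keys.Nodup

theorem factorize_spec (x0 : Nat) (h0 : 0 < x0) : FacSpec x0 (factorize (x0 : Int)) := by
  have htn : ((x0 : Int)).toNat = x0 := Int.toNat_natCast x0
  unfold factorize
  simp only [htn]
  have hinv0 : FacInv x0 x0 PySem.Dict.empty := by
    refine ⟨h0, dvd_rfl, fun p _ _ => rfl, ⟨?_, ?_⟩, PySem.Dict.nodup_keys_empty⟩
    · intro p hp hpx hnp; exact absurd hpx hnp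
    · intro q _; exact PySem.Dict.get?_empty q
  obtain ⟨hinv1, hsm1⟩ := stripFac_inv x0 2 x0 PySem.Dict.empty (le_refl 2) hinv0
    (fun m h2 hlt => absurd h2 (by omega))
  obtain ⟨hinv2, hend⟩ := oddLoop_inv x0 3 _ _ (by omega) (by omega) hinv1
    (by intro m h2 hlt; exact hsm1 m h2 (by omega))
  set y := (oddLoop 3 (stripFac 2 x0 PySem.Dict.empty).2 (stripFac 2 x0 PySem.Dict.empty).1).2 with hy
  set d2 := (oddLoop 3 (stripFac 2 x0 PySem.Dict.empty).2 (stripFac 2 x0 PySem.Dict.empty).1).1 with hd2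
  obtain ⟨hypos, hyd, hmult, ⟨hc1, hc2⟩, hnd⟩ := hinv2
  split
  next hgt =>
    have hyp : y.Prime := by
      rcases hend with h1 | hp
      · omega
      · exact hp
    have hgetnone : d2.get? (y : Int) = none := by
      apply hc2
      intro p hpq hcon
      have hpy : p = y := by exact_mod_cast hpq
      exact hcon.2.2 (hpy ▸ dvd_rfl)
    have hgetD0 : d2.getD (y : Int) 0 = 0 := PySem.Dict.getD_of_get?_eq_none _ _ hgetnone
    have hfy : x0.factorization y = 1 := by
      rw [hmult y hyp dvd_rfl, hyp.factorization_self]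
    refine ⟨?_, ?_, ?_⟩
    · intro p hp hpx0
      by_cases hpy : p = y
      · subst hpy
        rw [PySem.Dict.get?_insert_self, hgetD0, hfy]
        norm_num
      · have hqy : (p : Int) ≠ (y : Int) := by exact_mod_cast hpy
        rw [PySem.Dict.get?_insert_of_ne _ _ hqy]
        apply hc1 p hp hpx0
        intro hpdy
        exact hpy ((Nat.prime_dvd_prime_iff_eq hp hyp).mp hpdy)
    · intro q hq
      by_cases hqy : q = (y : Int)
      · exact absurd ⟨hyp, hyd⟩ (hq y hqy.symm)
      · rw [PySem.Dict.get?_insert_of_ne _ _ hqy]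
        apply hc2
        intro p hpq hcon
        exact hq p hpq ⟨hcon.1, hcon.2.1⟩
    · exact PySem.Dict.nodup_keys_insert _ _ _ hnd
  next hle =>
    have hy1 : y = 1 := by omega
    refine ⟨?_, ?_, hnd⟩
    · intro p hp hpx0
      apply hc1 p hp hpx0
      rw [hy1]
      intro hp1
      exact absurd (Nat.dvd_one.mp hp1) hp.one_lt.ne'
    · intro q hq
      apply hc2
      intro p hpq hcon
      exact hq p hpq ⟨hcon.1, hcon.2.1⟩

-- ===== B-side loop characterization =====
theorem altLoop_eq (A B : Int) (hA : 0 < A) (cap : Nat) :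
    ∀ (fuel n : Nat), fuel = cap - n →
      altLoop A B (PySem.Int.mod (B ^ n) A) n cap =
        (((List.range' n (cap - n)).find? (fun m => decide (A ∣ B ^ m))).map
          (fun m => (m : Int))).getD (-1) := by
  intro fuel
  induction fuel with
  | zero =>
    intro n h
    have hn : ¬ n < cap := by omega
    rw [altLoop, if_neg hn]
    have : cap - n = 0 := by omega
    rw [this]
    simp
  | succ f ih =>
    intro n h
    rcases Nat.lt_or_ge n cap with hn | hn
    · rw [altLoop, if_pos hn]
      have hrange : cap - n = (cap - (n + 1)) + 1 := by omega
      rw [hrange, List.range'_succ]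
      by_cases hz : PySem.Int.mod (B ^ n) A = 0
      · rw [if_pos hz]
        have hdvd : A ∣ B ^ n := (PySem.Int.mod_eq_zero_iff_dvd _ _).mp hz
        rw [List.find?_cons_of_pos (by simpa using hdvd)]
        simp
      · rw [if_neg hz]
        have hndvd : ¬ A ∣ B ^ n := fun hd => hz ((PySem.Int.mod_eq_zero_iff_dvd _ _).mpr hd)
        have hmodstep : PySem.Int.mod (PySem.Int.mod (B ^ n) A * B) A
            = PySem.Int.mod (B ^ (n + 1)) A := by
          rw [PySem.Int.mod_eq_emod_of_pos hA, PySem.Int.mod_eq_emod_of_pos hA,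
            PySem.Int.mod_eq_emod_of_pos hA]
          calc B ^ n % A * B % A = B ^ n % A % A * (B % A) % A := Int.mul_emod _ _ _
            _ = B ^ n % A * (B % A) % A := by rw [Int.emod_emod]
            _ = B ^ n * B % A := by rw [← Int.mul_emod]
            _ = B ^ (n + 1) % A := by rw [pow_succ]
        rw [hmodstep, List.find?_cons_of_neg (by simpa using hndvd)]
        rw [ih (n + 1) (by omega)]
    · rw [altLoop, if_neg (by omega)]
      have : cap - n = 0 := by omega
      rw [this]
      simp

theorem find?_range'_least (p : Nat → Bool) :
    ∀ (n s N : Nat), s ≤ N → N < s + n → p N = true → (∀ m, m < N → p m = false) →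
      (List.range' s n).find? p = some N := by
  intro n
  induction n with
  | zero => intro s N h1 h2 _ _; omega
  | succ n ih =>
    intro s N h1 h2 hp hmin
    rw [List.range'_succ]
    by_cases hs : s = N
    · subst hs
      exact List.find?_cons_of_pos hp
    · rw [List.find?_cons_of_neg (by simp [hmin s (by omega)])]
      exact ih (s + 1) N (by omega) (by omega) hp hmin

theorem foldl_max_spec (f : Int → Int) :
    ∀ (L : List Int) (a : Int),
      a ≤ L.foldl (fun n q => if n < f q then f q else n) a ∧
      (∀ q ∈ L, f q ≤ L.foldl (fun n q => if n < f q then f q else n) a) ∧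
      (L.foldl (fun n q => if n < f q then f q else n) a = a ∨
        ∃ q ∈ L, L.foldl (fun n q => if n < f q then f q else n) a = f q) := by
  intro L
  induction L with
  | nil => intro a; simp
  | cons x L ih =>
    intro a
    simp only [List.foldl_cons]
    obtain ⟨h1, h2, h3⟩ := ih (if a < f x then f x else a)
    have haux : a ≤ (if a < f x then f x else a) := by split <;> omega
    have hfx : f x ≤ (if a < f x then f x else a) := by split <;> omega
    refine ⟨le_trans haux h1, ?_, ?_⟩
    · intro q hq
      rcases List.mem_cons.mp hq with rfl | hq
      · exact le_trans hfx h1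
      · exact h2 q hq
    · rcases h3 with he | ⟨q, hq, he⟩
      · rw [he]
        by_cases hlt : a < f x
        · rw [if_pos hlt] at he ⊢
          exact Or.inr ⟨x, List.mem_cons_self .., rfl⟩
        · rw [if_neg hlt]
          exact Or.inl rfl
      · exact Or.inr ⟨q, List.mem_cons_of_mem _ hq, he⟩

theorem ceil_le_iff (a b n : Nat) (ha : 0 < a) (hb : 0 < b) :
    (a + b - 1) / b ≤ n ↔ a ≤ n * b := by
  rw [← Nat.lt_succ_iff, Nat.div_lt_iff_lt_mul hb]
  have h : n.succ * b = n * b + b := Nat.succ_mul n b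
  omega

-- ===== VERDICT (by name: the statement is the Claim_ definition above) =====
theorem find_min_n_spec : Claim_equal_find_min_n := by
  unfold Claim_equal_find_min_n
  intro A B _ hpre
  unfold Spec_find_min_n
  obtain ⟨hA, hB⟩ := hpre
  set a := A.toNat with hadef
  set b := B.toNat with hbdef
  have hAa : (a : Int) = A := by omega
  have hBb : (b : Int) = B := by omega
  have ha1 : 0 < a := by omega
  have hb1 : 0 < b := by omega
  have hfA : FacSpec a (factorize A) := by rw [← hAa]; exact factorize_spec a ha1
  have hfB : FacSpec b (factorize B) := by rw [← hBb]; exact factorize_spec b hb1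
  have hmemA : ∀ q : Int, q ∈ (factorize A).keys ↔ ∃ p : Nat, p.Prime ∧ p ∣ a ∧ q = (p : Int) := by
    intro q
    constructor
    · intro hq
      by_contra hnex
      push_neg at hnex
      have hnone : (factorize A).get? q = none := by
        apply hfA.2.1
        intro p hpq hc
        exact hnex p hc.1 hc.2 hpq.symm
      exact ((PySem.Dict.get?_eq_none_iff_not_mem_keys _ _).mp hnone) hq
    · rintro ⟨p, hp, hpd, rfl⟩
      by_contra hq
      have hsome := hfA.1 p hp hpd
      rw [(PySem.Dict.get?_eq_none_iff_not_mem_keys _ _).mpr hq] at hsome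
      simp at hsome
  have hmemB : ∀ q : Int, q ∈ (factorize B).keys ↔ ∃ p : Nat, p.Prime ∧ p ∣ b ∧ q = (p : Int) := by
    intro q
    constructor
    · intro hq
      by_contra hnex
      push_neg at hnex
      have hnone : (factorize B).get? q = none := by
        apply hfB.2.1
        intro p hpq hc
        exact hnex p hc.1 hc.2 hpq.symm
      exact ((PySem.Dict.get?_eq_none_iff_not_mem_keys _ _).mp hnone) hq
    · rintro ⟨p, hp, hpd, rfl⟩
      by_contra hq
      have hsome := hfB.1 p hp hpd
      rw [(PySem.Dict.get?_eq_none_iff_not_mem_keys _ _).mpr hq] at hsome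
      simp at hsome
  by_cases hC : (factorize A).keys.any (fun p => !((factorize B).contains p)) = true
  · -- some prime of A is missing from B: both sides return -1
    obtain ⟨q, hqmem, hqc⟩ := List.any_eq_true.mp hC
    obtain ⟨p, hp, hpa, rfl⟩ := (hmemA q).mp hqmem
    have hnpb : ¬ p ∣ b := by
      intro hpb
      have hsome := hfB.1 p hp hpb
      have hc : (factorize B).contains (p : Int) = true := by
        rw [PySem.Dict.contains_eq_isSome_get?, hsome]; rfl
      rw [hc] at hqc
      simp at hqc
    have hnd : ∀ m : Nat, ¬ A ∣ B ^ m := by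
      intro m hdvd
      rw [← hAa, ← hBb] at hdvd
      have hanat : a ∣ b ^ m := by exact_mod_cast hdvd
      exact hnpb (hp.dvd_of_dvd_pow (dvd_trans hpa hanat))
    have hlhs : find_min_n A B = -1 := by
      simp only [find_min_n]
      rw [if_pos hC]
    have hrhs : find_min_n_alt A B = -1 := by
      rw [find_min_n_alt]
      have h1 : PySem.Int.mod 1 A = PySem.Int.mod (B ^ 0) A := by rw [pow_zero]
      rw [h1, altLoop_eq A B (by omega) (PySem.Int.bitLength A) (PySem.Int.bitLength A) 0 (by omega)]
      rw [List.find?_eq_none.mpr (fun m _ => by simpa using hnd m)]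
      simp
    rw [hlhs, hrhs]
  · -- every prime of A divides B
    have hCf : (factorize A).keys.any (fun p => !((factorize B).contains p)) = false :=
      Bool.eq_false_iff.mpr hC
    have hall : ∀ p : Nat, p.Prime → p ∣ a → p ∣ b := by
      intro p hp hpa
      have hq : (p : Int) ∈ (factorize A).keys := (hmemA _).mpr ⟨p, hp, hpa, rfl⟩
      have hcc := List.any_eq_false.mp hCf _ hq
      have hcontains : (factorize B).contains (p : Int) = true := by
        by_contra hc
        simp [Bool.eq_false_iff.mpr hc] at hcc
      have hmem : (p : Int) ∈ (factorize B).keys := (PySem.Dict.contains_iff_mem_keys _ _).mp hcontains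
      obtain ⟨p', hp', hpb', hpe⟩ := (hmemB _).mp hmem
      have : p' = p := by exact_mod_cast hpe.symm
      exact this ▸ hpb'
    have hgA : ∀ p : Nat, p.Prime → p ∣ a →
        (factorize A).getD (p : Int) 0 = (a.factorization p : Int) :=
      fun p hp hpd => PySem.Dict.getD_of_get?_eq_some _ _ (hfA.1 p hp hpd)
    have hgB : ∀ p : Nat, p.Prime → p ∣ a →
        (factorize B).getD (p : Int) 0 = (b.factorization p : Int) :=
      fun p hp hpd => PySem.Dict.getD_of_get?_eq_some _ _ (hfB.1 p hp (hall p hp hpd))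
    set L := (factorize A).keys with hL
    set F : Int → Int := fun q => PySem.Int.floordiv
      ((factorize A).getD q 0 + (factorize B).getD q 0 - 1) ((factorize B).getD q 0) with hF
    have hitems : (factorize A).items = L.map (fun k => (k, (factorize A).getD k 0)) :=
      PySem.Dict.items_eq_map_keys _ hfA.2.2 0
    have hlhs : find_min_n A B = L.foldl (fun n q => if n < F q then F q else n) 0 := by
      simp only [find_min_n]
      rw [if_neg (by rw [hCf]; simp), hitems, List.foldl_map]
    obtain ⟨hz0, hzub, hzcases⟩ := foldl_max_spec F L 0
    set z := L.foldl (fun n q => if n < F q then F q else n) 0 with hz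
    set N := z.toNat with hN
    have hzN : (N : Int) = z := Int.toNat_of_nonneg hz0
    have hFval : ∀ p : Nat, p.Prime → p ∣ a →
        F (p : Int) = (((a.factorization p + b.factorization p - 1) / b.factorization p : Nat) : Int) := by
      intro p hp hpd
      have hfa1 : 0 < a.factorization p := hp.factorization_pos_of_dvd (by omega) hpd
      rw [hF]
      simp only []
      rw [hgA p hp hpd, hgB p hp hpd]
      have hcast : ((a.factorization p : Int) + (b.factorization p : Int) - 1)
          = ((a.factorization p + b.factorization p - 1 : Nat) : Int) := by omega
      rw [hcast, PySem.Int.floordiv_natCast]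
    have halpha : ∀ p : Nat, p.Prime → p ∣ a → a.factorization p ≤ N * b.factorization p := by
      intro p hp hpd
      have hub := hzub (p : Int) ((hmemA _).mpr ⟨p, hp, hpd, rfl⟩)
      rw [hFval p hp hpd, ← hzN] at hub
      have hnat : (a.factorization p + b.factorization p - 1) / b.factorization p ≤ N := by
        exact_mod_cast hub
      exact (ceil_le_iff _ _ _ (hp.factorization_pos_of_dvd (by omega) hpd)
        (hp.factorization_pos_of_dvd (by omega) (hall p hp hpd))).mp hnat
    have hdvdN : a ∣ b ^ N := by
      rw [← Nat.factorization_le_iff_dvd (by omega) (pow_ne_zero _ (by omega)),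
        Nat.factorization_pow, Finsupp.le_def]
      intro p
      simp only [Finsupp.smul_apply, smul_eq_mul]
      by_cases hp : p.Prime
      · by_cases hpd : p ∣ a
        · exact halpha p hp hpd
        · rw [Nat.factorization_eq_zero_of_not_dvd hpd]; omega
      · rw [Nat.factorization_eq_zero_of_not_prime _ hp]; omega
    have hmin : ∀ m, m < N → ¬ a ∣ b ^ m := by
      intro m hm hdvd
      rcases hzcases with hz0' | ⟨q, hqL, hzq⟩
      · rw [hz0'] at hzN
        omega
      · obtain ⟨p, hp, hpd, rfl⟩ := (hmemA q).mp hqL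
        rw [hFval p hp hpd] at hzq
        have hNceil : N = (a.factorization p + b.factorization p - 1) / b.factorization p := by
          exact_mod_cast hzN.trans hzq
        have hfa : a.factorization p ≤ m * b.factorization p := by
          have hle := (Nat.factorization_le_iff_dvd (by omega) (pow_ne_zero _ (by omega))).mpr hdvd
          have hlep := Finsupp.le_def.mp hle p
          rwa [Nat.factorization_pow, Finsupp.smul_apply, smul_eq_mul] at hlep
        have hceil_le : (a.factorization p + b.factorization p - 1) / b.factorization p ≤ m :=
          (ceil_le_iff _ _ _ (hp.factorization_pos_of_dvd (by omega) hpd)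
            (hp.factorization_pos_of_dvd (by omega) (hall p hp hpd))).mpr hfa
        omega
    have hnatAbs : A.natAbs = a := by omega
    have hacap : a < 2 ^ PySem.Int.bitLength A := by
      have hlt := PySem.Int.lt_two_pow_bitLength A
      omega
    have hcap : N < PySem.Int.bitLength A := by
      rcases hzcases with hz0' | ⟨q, hqL, hzq⟩
      · rw [hz0'] at hzN
        have hN0 : N = 0 := by omega
        rw [hN0]
        by_contra h0
        have hbl : PySem.Int.bitLength A = 0 := by omega
        rw [hbl] at hacap
        simp at hacap
        omega
      · obtain ⟨p, hp, hpd, rfl⟩ := (hmemA q).mp hqL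
        rw [hFval p hp hpd] at hzq
        have hNceil : N = (a.factorization p + b.factorization p - 1) / b.factorization p := by
          exact_mod_cast hzN.trans hzq
        have hfa1 : 0 < a.factorization p := hp.factorization_pos_of_dvd (by omega) hpd
        have hfb1 : 0 < b.factorization p := hp.factorization_pos_of_dvd (by omega) (hall p hp hpd)
        have hceilafp : N ≤ a.factorization p := by
          rw [hNceil]
          exact (ceil_le_iff _ _ _ hfa1 hfb1).mpr (Nat.le_mul_of_pos_right _ hfb1)
        have hpow : 2 ^ a.factorization p ≤ a :=
          le_trans (Nat.pow_le_pow_left hp.two_le _) (Nat.ordProj_le p (by omega))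
        have hlt2 : 2 ^ a.factorization p < 2 ^ PySem.Int.bitLength A := by omega
        have := (Nat.pow_lt_pow_iff_right (by norm_num : 1 < 2)).mp hlt2
        omega
    have hrhs : find_min_n_alt A B = (N : Int) := by
      rw [find_min_n_alt]
      have h1 : PySem.Int.mod 1 A = PySem.Int.mod (B ^ 0) A := by rw [pow_zero]
      rw [h1, altLoop_eq A B (by omega) (PySem.Int.bitLength A) (PySem.Int.bitLength A) 0 (by omega)]
      have hfind : (List.range' 0 (PySem.Int.bitLength A - 0)).find?
          (fun m => decide (A ∣ B ^ m)) = some N := by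
        apply find?_range'_least _ _ 0 N (by omega) (by omega)
        · simp only [decide_eq_true_eq]
          rw [← hAa, ← hBb]
          exact_mod_cast Int.natCast_dvd_natCast.mpr hdvdN
        · intro m hm
          simp only [decide_eq_false_iff_not]
          intro hdvd
          apply hmin m hm
          rw [← hAa, ← hBb] at hdvd
          exact_mod_cast hdvd
      rw [hfind]
      simp
    rw [hlhs, hrhs]
    exact hzN.symm
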